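-- pv_equiv track=rewrite | github.com/PotatoAuthor/HackerSnackers | freeTimes.py | run_lengths
-- ===== SOURCE A (Python) =====
-- def run_lengths(occupied: list[int]) -> dict[int, int]:
--     """
--     Track the length and starting index of the runs of number 1
--     :param occupied: A list of 0's and 1's that reflect whether the i'th fifteen minute interval has
--     any events for intervals extending from now.
--     """
--     run_length = {}
--     start = 0
--     while occupied[start] != 0:
--         start += 1
--     for i in range(start, len(occupied)):
--         if occupied[i] == 1:
--             run_length[start] = i - start
--             start = i + 1
--     if occupied[len(occupied) - 1] == 0:
--         run_length[start] = len(occupied) - start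
--     run_length = {key: run_length[key] for key in run_length if run_length[key] != 0}
--     return run_length
-- ===== SOURCE B (Python) =====
-- def run_lengths(occupied: list[int]) -> dict[int, int]:
--     first = 0
--     while occupied[first] != 0:
--         first += 1
--     n = len(occupied)
--     end = n if occupied[n - 1] == 0 else None
--     pairs = []
--     for i in range(n - 1, first - 1, -1):
--         if occupied[i] == 1:
--             if end is not None and end - (i + 1) > 0:
--                 pairs.append((i + 1, end - (i + 1)))
--             end = i
--     if end is not None and end - first > 0:
--         pairs.append((first, end - first))
--     return dict(reversed(pairs))
-- ===== Notes on version B (the rewrite author's own statement) =====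
-- stated objective: alternative
-- what changed: A scans left-to-right threading a moving start through a dict it later rebuilds to drop zero lengths; B scans the list RIGHT-TO-LEFT with an Optional end-of-run marker, emits each (start,length) pair back-to-front the moment it sees the 1 that opens it, skipping empty runs on the fly, and reverses the pair list once at the end (no dict threading, no rebuild pass).
import Mathlib
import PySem

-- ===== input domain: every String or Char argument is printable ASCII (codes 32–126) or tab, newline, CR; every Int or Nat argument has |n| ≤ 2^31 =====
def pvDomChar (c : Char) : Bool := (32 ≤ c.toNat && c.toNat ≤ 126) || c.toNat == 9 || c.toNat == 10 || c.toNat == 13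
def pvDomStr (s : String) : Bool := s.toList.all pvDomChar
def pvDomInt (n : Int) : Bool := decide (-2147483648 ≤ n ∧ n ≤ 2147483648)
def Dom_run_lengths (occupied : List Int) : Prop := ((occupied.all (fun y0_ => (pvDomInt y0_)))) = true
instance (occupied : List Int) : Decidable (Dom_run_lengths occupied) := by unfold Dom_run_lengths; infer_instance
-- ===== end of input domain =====

-- B scans right-to-left with an Optional end marker, emitting pairs back-to-front and
-- reversing once, instead of A's left-to-right dict-threading loop plus rebuild pass;
-- equal output on every input where A returns (Pre_: 0 occurs in the list).

-- ===== PORT A =====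
-- the initial 'while occupied[start] != 0: start += 1' loop; the out-of-range branch is where
-- Python raises IndexError (excluded by Pre_run_lengths)
def pvSkipA (occupied : List Int) (start : Nat) : Nat :=
  if h : start < occupied.length then
    if occupied[start] ≠ 0 then pvSkipA occupied (start + 1) else start
  else start
termination_by occupied.length - start

def run_lengths (occupied : List Int) : List (Int × Int) :=
  let start0 : Int := (pvSkipA occupied 0 : Nat)
  let res := (PySem.List.pyRange start0 (occupied.length : Int) 1).foldl
      (fun (acc : PySem.Dict Int Int × Int) i =>
        if PySem.List.pyGetD occupied i 0 == 1 then (acc.1.insert acc.2 (i - acc.2), i + 1) else acc)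
      (PySem.Dict.empty, start0)
  let rl := if PySem.List.pyGetD occupied ((occupied.length : Int) - 1) 0 == 0 then
              res.1.insert res.2 ((occupied.length : Int) - res.2) else res.1
  -- final dict comprehension: iterate the dict, keep the pairs with nonzero value
  (rl.items.foldl (fun (d : PySem.Dict Int Int) p => if p.2 != 0 then d.insert p.1 p.2 else d)
      PySem.Dict.empty).items

-- ===== PORT B =====
-- B's own copy of the initial while loop (same IndexError region, excluded by Pre_)
def pvSkipB (occupied : List Int) (first : Nat) : Nat :=
  if h : first < occupied.length then
    if occupied[first] ≠ 0 then pvSkipB occupied (first + 1) else first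
  else first
termination_by occupied.length - first

def run_lengths_alt (occupied : List Int) : List (Int × Int) :=
  let first : Int := (pvSkipB occupied 0 : Nat)
  let n : Int := occupied.length
  -- end = n if occupied[n-1] == 0 else None ; pairs = []
  let res := (PySem.List.pyRange (n - 1) (first - 1) (-1)).foldl
      (fun (acc : Option Int × List (Int × Int)) i =>
        if PySem.List.pyGetD occupied i 0 == 1 then
          (some i,
           match acc.1 with
           | some e => if e - (i + 1) > 0 then acc.2 ++ [(i + 1, e - (i + 1))] else acc.2
           | none => acc.2)
        else acc)
      ((if PySem.List.pyGetD occupied (n - 1) 0 == 0 then some n else none), [])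
  let pairs := match res.1 with
    | some e => if e - first > 0 then res.2 ++ [(first, e - first)] else res.2
    | none => res.2
  pairs.reverse

-- ===== PRECONDITION & SPEC =====
-- Pre_ excludes exactly the inputs on which A raises IndexError (no 0 in the list, incl. []);
-- B raises IndexError there too (same initial while loop).
def Pre_run_lengths (occupied : List Int) : Prop := (0 : Int) ∈ occupied
instance (occupied : List Int) : Decidable (Pre_run_lengths occupied) := by
  unfold Pre_run_lengths; infer_instance
def pvWitness_run_lengths : List Int := [1, 0, 1, 1, 0, 0]
def Spec_run_lengths (occupied : List Int) (out : List (Int × Int)) : Prop := out = run_lengths_alt occupied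
instance (occupied : List Int) (out : List (Int × Int)) : Decidable (Spec_run_lengths occupied out) := by unfold Spec_run_lengths; infer_instance

-- ===== CLAIM (what is proved, stated in full; the proofs are below) =====
def Claim_equal_run_lengths : Prop := ∀ (occupied : List Int), Dom_run_lengths occupied → Pre_run_lengths occupied → Spec_run_lengths occupied (run_lengths occupied)


-- ===== LEMMAS AND PROOFS =====

-- the (start, length) pairs A records while scanning the one-positions `ones` from start `st`
def pvPairs (st : Int) : List Int → List (Int × Int)
  | [] => []
  | j :: rest => (st, j - st) :: pvPairs (j + 1) rest

-- the value of A's `start` variable after the scan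
def pvLast (st : Int) : List Int → Int
  | [] => st
  | j :: rest => pvLast (j + 1) rest

-- the trailing pair B's Optional end marker contributes
def pvTail (L : Int) : Option Int → List (Int × Int)
  | some v => [(L, v - L)]
  | none => []

theorem pvSkipA_eq (occ : List Int) (s : Nat) (h : (0 : Int) ∈ occ.drop s) :
    pvSkipA occ s = s + (occ.drop s).idxOf 0 := by
  rw [pvSkipA]
  have hs : s < occ.length := by
    by_contra hle
    rw [List.drop_eq_nil_of_le (Nat.le_of_not_lt hle)] at h
    simp at h
  rw [dif_pos hs]
  have hd : occ.drop s = occ[s] :: occ.drop (s + 1) := List.drop_eq_getElem_cons hs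
  by_cases h0 : occ[s] = 0
  · rw [if_neg (by simp [h0]), hd, h0, List.idxOf_cons_self]
    omega
  · have h' : (0 : Int) ∈ occ.drop (s + 1) := by
      rw [hd] at h
      rcases List.mem_cons.mp h with h1 | h1
      · exact absurd h1.symm h0
      · exact h1
    rw [if_pos h0, pvSkipA_eq occ (s + 1) h', hd, List.idxOf_cons_ne _ (fun e => h0 e)]
    omega
termination_by occ.length - s
decreasing_by omega

theorem pvSkipB_eq_pvSkipA (occ : List Int) (s : Nat) : pvSkipB occ s = pvSkipA occ s := by
  rw [pvSkipB, pvSkipA]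
  split
  · split
    · exact pvSkipB_eq_pvSkipA occ (s + 1)
    · rfl
  · rfl
termination_by occ.length - s
decreasing_by omega

theorem contains_false_of_keys_lt (d : PySem.Dict Int Int) (st : Int)
    (h : ∀ k ∈ d.keys, k < st) : d.contains st = false := by
  by_contra hc
  have : st ∈ d.keys := (PySem.Dict.contains_iff_mem_keys d st).mp (by
    cases hcc : d.contains st
    · exact absurd hcc hc
    · rfl)
  exact absurd (h st this) (by omega)

-- A's scan over the one-positions: items append pvPairs, start becomes pvLast, keys stay below it
theorem foldA (ones : List Int) : ∀ (d : PySem.Dict Int Int) (st : Int),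
    (∀ k ∈ d.keys, k < st) → (∀ j ∈ ones, st ≤ j) → ones.Pairwise (· < ·) →
    (ones.foldl (fun (acc : PySem.Dict Int Int × Int) i =>
        (acc.1.insert acc.2 (i - acc.2), i + 1)) (d, st)).1.items = d.items ++ pvPairs st ones ∧
    (ones.foldl (fun (acc : PySem.Dict Int Int × Int) i =>
        (acc.1.insert acc.2 (i - acc.2), i + 1)) (d, st)).2 = pvLast st ones ∧
    ∀ k ∈ (ones.foldl (fun (acc : PySem.Dict Int Int × Int) i =>
        (acc.1.insert acc.2 (i - acc.2), i + 1)) (d, st)).1.keys, k < pvLast st ones := by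
  induction ones with
  | nil => intro d st hk _ _; simpa [pvPairs, pvLast] using hk
  | cons j rest ih =>
    intro d st hk hge hpw
    have hstj : st ≤ j := hge j (List.mem_cons_self ..)
    have hnc : d.contains st = false := contains_false_of_keys_lt d st hk
    have hk' : ∀ k ∈ (d.insert st (j - st)).keys, k < j + 1 := by
      intro k hkm
      rcases (PySem.Dict.mem_keys_insert _ _ _ _).mp hkm with h1 | h1
      · omega
      · have := hk k h1; omega
    have hge' : ∀ j' ∈ rest, j + 1 ≤ j' := by
      intro j' hj'
      have := (List.pairwise_cons.mp hpw).1 j' hj'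
      omega
    have hpw' := (List.pairwise_cons.mp hpw).2
    have hmain := ih (d.insert st (j - st)) (j + 1) hk' hge' hpw'
    have hitems : (d.insert st (j - st)).items = d.items ++ [(st, j - st)] :=
      PySem.Dict.items_insert_of_not_contains _ _ hnc
    refine ⟨?_, ?_, ?_⟩
    · simp only [List.foldl_cons, hmain.1, hitems, pvPairs, List.append_assoc, List.cons_append,
        List.nil_append]
    · simpa [pvLast] using hmain.2.1
    · simpa [pvLast] using hmain.2.2

-- the final dict comprehension over fresh increasing keys is a list filter
theorem foldFilter (ps : List (Int × Int)) : ∀ (d : PySem.Dict Int Int),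
    (∀ p ∈ ps, ∀ k ∈ d.keys, k < p.1) → ps.Pairwise (fun p q => p.1 < q.1) →
    (ps.foldl (fun (d : PySem.Dict Int Int) p => if p.2 != 0 then d.insert p.1 p.2 else d) d).items
      = d.items ++ ps.filter (fun p => p.2 != 0) := by
  induction ps with
  | nil => intro d _ _; simp
  | cons p rest ih =>
    intro d hf hpw
    by_cases hz : (p.2 != 0) = true
    · have hnc : d.contains p.1 = false :=
        contains_false_of_keys_lt d p.1 (hf p (List.mem_cons_self ..))
      have hitems : (d.insert p.1 p.2).items = d.items ++ [(p.1, p.2)] :=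
        PySem.Dict.items_insert_of_not_contains _ _ hnc
      have hf' : ∀ q ∈ rest, ∀ k ∈ (d.insert p.1 p.2).keys, k < q.1 := by
        intro q hq k hkm
        have hpq := (List.pairwise_cons.mp hpw).1 q hq
        rcases (PySem.Dict.mem_keys_insert _ _ _ _).mp hkm with h1 | h1
        · omega
        · have := hf p (List.mem_cons_self ..) k h1; omega
      rw [List.foldl_cons, if_pos hz, ih _ hf' (List.pairwise_cons.mp hpw).2, hitems]
      simp [hz]
    · have hf' : ∀ q ∈ rest, ∀ k ∈ d.keys, k < q.1 := fun q hq =>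
        hf q (List.mem_cons_of_mem _ hq)
      rw [List.foldl_cons, if_neg hz, ih _ hf' (List.pairwise_cons.mp hpw).2,
        List.filter_cons, if_neg hz]

theorem pvLast_ge (ones : List Int) : ∀ st, (∀ j ∈ ones, st ≤ j) → ones.Pairwise (· < ·) →
    st ≤ pvLast st ones := by
  induction ones with
  | nil => intro st _ _; simp [pvLast]
  | cons j rest ih =>
    intro st hge hpw
    have h1 : st ≤ j := hge j (List.mem_cons_self ..)
    have h2 : ∀ j' ∈ rest, j + 1 ≤ j' := by
      intro j' hj'; have := (List.pairwise_cons.mp hpw).1 j' hj'; omega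
    have := ih (j + 1) h2 (List.pairwise_cons.mp hpw).2
    simp only [pvLast]; omega

theorem pvLast_le (ones : List Int) : ∀ st n, (∀ j ∈ ones, j < n) → st ≤ n →
    pvLast st ones ≤ n := by
  induction ones with
  | nil => intro st n _ h; simpa [pvLast] using h
  | cons j rest ih =>
    intro st n hlt hst
    have h1 : j < n := hlt j (List.mem_cons_self ..)
    have := ih (j + 1) n (fun j' hj' => hlt j' (List.mem_cons_of_mem _ hj')) (by omega)
    simpa using this

theorem pvPairs_keys (ones : List Int) : ∀ st, (∀ j ∈ ones, st ≤ j) → ones.Pairwise (· < ·) →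
    (∀ p ∈ pvPairs st ones, st ≤ p.1 ∧ p.1 < pvLast st ones) ∧
    (pvPairs st ones).Pairwise (fun p q => p.1 < q.1) := by
  induction ones with
  | nil => intro st _ _; simp [pvPairs]
  | cons j rest ih =>
    intro st hge hpw
    have h1 : st ≤ j := hge j (List.mem_cons_self ..)
    have h2 : ∀ j' ∈ rest, j + 1 ≤ j' := by
      intro j' hj'; have := (List.pairwise_cons.mp hpw).1 j' hj'; omega
    have hihm := ih (j + 1) h2 (List.pairwise_cons.mp hpw).2
    have hlge := pvLast_ge rest (j + 1) h2 (List.pairwise_cons.mp hpw).2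
    constructor
    · intro p hp
      rcases List.mem_cons.mp hp with h3 | h3
      · subst h3; simp only [pvLast]; omega
      · have := hihm.1 p h3; simp only [pvLast]; omega
    · rw [pvPairs, List.pairwise_cons]
      refine ⟨fun q hq => ?_, hihm.2⟩
      have := hihm.1 q hq; omega

-- B's right-to-left scan over the one-positions (as a foldr) produces, after the final
-- fix-up and reverse, exactly A's recorded pairs filtered for nonzero length
theorem foldB (ones : List Int) : ∀ (st : Int) (E : Option Int),
    (∀ j ∈ ones, st ≤ j) → ones.Pairwise (· < ·) →
    (∀ v, E = some v → pvLast st ones ≤ v) →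
    (match (ones.foldr (fun i (acc : Option Int × List (Int × Int)) =>
        (some i,
         match acc.1 with
         | some e => if e - (i + 1) > 0 then acc.2 ++ [(i + 1, e - (i + 1))] else acc.2
         | none => acc.2)) (E, [])).1 with
     | some e => if e - st > 0 then
          (ones.foldr (fun i (acc : Option Int × List (Int × Int)) =>
            (some i,
             match acc.1 with
             | some e => if e - (i + 1) > 0 then acc.2 ++ [(i + 1, e - (i + 1))] else acc.2
             | none => acc.2)) (E, [])).2 ++ [(st, e - st)]
        else (ones.foldr (fun i (acc : Option Int × List (Int × Int)) =>
            (some i,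
             match acc.1 with
             | some e => if e - (i + 1) > 0 then acc.2 ++ [(i + 1, e - (i + 1))] else acc.2
             | none => acc.2)) (E, [])).2
     | none => (ones.foldr (fun i (acc : Option Int × List (Int × Int)) =>
            (some i,
             match acc.1 with
             | some e => if e - (i + 1) > 0 then acc.2 ++ [(i + 1, e - (i + 1))] else acc.2
             | none => acc.2)) (E, [])).2).reverse
    = (pvPairs st ones ++ pvTail (pvLast st ones) E).filter (fun p => p.2 != 0) := by
  induction ones with
  | nil =>
    intro st E _ _ hE
    match E with
    | none => simp [pvPairs, pvTail]
    | some v =>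
      have hv : st ≤ v := hE v rfl
      simp only [List.foldr_nil, pvPairs, pvLast, pvTail, List.nil_append]
      by_cases h : v - st > 0
      · rw [if_pos h]
        simp [List.filter, show (v - st != 0) = true by simp; omega]
      · have : v = st := by omega
        subst this
        simp [List.filter]
  | cons j rest ih =>
    intro st E hge hpw hE
    have h1 : st ≤ j := hge j (List.mem_cons_self ..)
    have h2 : ∀ j' ∈ rest, j + 1 ≤ j' := by
      intro j' hj'; have := (List.pairwise_cons.mp hpw).1 j' hj'; omega
    have hE' : ∀ v, E = some v → pvLast (j + 1) rest ≤ v := by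
      intro v hv; simpa [pvLast] using hE v hv
    have hih := ih (j + 1) E h2 (List.pairwise_cons.mp hpw).2 hE'
    simp only [List.foldr_cons] at *
    set r := rest.foldr (fun i (acc : Option Int × List (Int × Int)) =>
        (some i,
         match acc.1 with
         | some e => if e - (i + 1) > 0 then acc.2 ++ [(i + 1, e - (i + 1))] else acc.2
         | none => acc.2)) (E, []) with hr
    show (if j - st > 0 then
            (match r.1 with
             | some e => if e - (j + 1) > 0 then r.2 ++ [(j + 1, e - (j + 1))] else r.2
             | none => r.2) ++ [(st, j - st)]
          else (match r.1 with
             | some e => if e - (j + 1) > 0 then r.2 ++ [(j + 1, e - (j + 1))] else r.2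
             | none => r.2)).reverse = _
    by_cases hz : j - st > 0
    · rw [if_pos hz, List.reverse_append, hih]
      simp only [pvPairs, pvLast, List.cons_append, List.filter_cons,
        show ((j - st : Int) != 0) = true by simp; omega]
      simp
    · have : j = st := by omega
      subst this
      rw [if_neg hz, hih]
      simp only [pvPairs, pvLast, List.cons_append, List.filter_cons]
      simp

-- ===== VERDICT (by name: the statement is the Claim_ definition above) =====
theorem run_lengths_spec : Claim_equal_run_lengths := by
  intro occupied _ hpre
  unfold Spec_run_lengths run_lengths run_lengths_alt
  dsimp only
  have hmem : (0 : Int) ∈ occupied := hpre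
  have hskip : pvSkipA occupied 0 = occupied.idxOf 0 := by
    simpa using pvSkipA_eq occupied 0 (by simpa using hmem)
  have hskipB : pvSkipB occupied 0 = occupied.idxOf 0 := by
    rw [pvSkipB_eq_pvSkipA]; exact hskip
  rw [hskip, hskipB]
  set n : Int := (occupied.length : Int) with hn
  set fi : Int := ((occupied.idxOf 0 : Nat) : Int) with hfi
  set ones : List Int :=
    (PySem.List.pyRange fi n 1).filter (fun i => PySem.List.pyGetD occupied i 0 == 1) with hones
  have hflt : occupied.idxOf 0 < occupied.length := List.idxOf_lt_length_of_mem hmem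
  have hfin : fi ≤ n := by rw [hfi, hn]; exact_mod_cast Nat.le_of_lt hflt
  have honesmem : ∀ j ∈ ones, fi ≤ j ∧ j < n := by
    intro j hj
    have := List.mem_of_mem_filter hj
    exact (PySem.List.mem_pyRange_one).mp this
  have honespw : ones.Pairwise (· < ·) :=
    List.Pairwise.filter _ (PySem.List.pairwise_lt_pyRange_one fi n)
  -- A's range loop = loop over the filtered one-positions
  rw [PySem.List.foldl_if_eq_foldl_filter
    (fun i => PySem.List.pyGetD occupied i 0 == 1)
    (fun (acc : PySem.Dict Int Int × Int) i => (acc.1.insert acc.2 (i - acc.2), i + 1))]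
  have hA := foldA ones PySem.Dict.empty fi (by simp) (fun j hj => (honesmem j hj).1) honespw
  set L : Int := pvLast fi ones with hL
  have hLn : L ≤ n := pvLast_le ones fi n (fun j hj => (honesmem j hj).2) hfin
  have hpk := pvPairs_keys ones fi (fun j hj => (honesmem j hj).1) honespw
  set T : List Int := if PySem.List.pyGetD occupied (n - 1) 0 == 0 then [n] else [] with hT
  -- A's dict after the trailing fix-up, as a list
  have hemp : (PySem.Dict.empty : PySem.Dict Int Int).items = [] := rfl
  have hrl : (if PySem.List.pyGetD occupied (n - 1) 0 == 0 then
        ((ones.foldl (fun (acc : PySem.Dict Int Int × Int) i =>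
          (acc.1.insert acc.2 (i - acc.2), i + 1)) (PySem.Dict.empty, fi)).1.insert
          (ones.foldl (fun (acc : PySem.Dict Int Int × Int) i =>
            (acc.1.insert acc.2 (i - acc.2), i + 1)) (PySem.Dict.empty, fi)).2
          (n - (ones.foldl (fun (acc : PySem.Dict Int Int × Int) i =>
            (acc.1.insert acc.2 (i - acc.2), i + 1)) (PySem.Dict.empty, fi)).2))
      else (ones.foldl (fun (acc : PySem.Dict Int Int × Int) i =>
          (acc.1.insert acc.2 (i - acc.2), i + 1)) (PySem.Dict.empty, fi)).1).items
      = pvPairs fi ones ++ T.map (fun e => (L, e - L)) := by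
    rw [hT]
    split
    · rw [hA.2.1, PySem.Dict.items_insert_of_not_contains _ _
        (contains_false_of_keys_lt _ _ hA.2.2), hA.1]
      simp [hL, hemp]
    · rw [hA.1]; simp [hemp]
  rw [hrl]
  have hps : ∀ p ∈ pvPairs fi ones ++ T.map (fun e => (L, e - L)),
      ∀ k ∈ (PySem.Dict.empty : PySem.Dict Int Int).keys, k < p.1 := by
    intro p _ k hk
    simp [PySem.Dict.keys_empty] at hk
  have hppw : (pvPairs fi ones ++ T.map (fun e => (L, e - L))).Pairwise
      (fun p q => p.1 < q.1) := by
    rw [List.pairwise_append]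
    refine ⟨hpk.2, ?_, ?_⟩
    · rw [hT]; split <;> simp
    · intro p hp q hq
      rcases List.mem_map.mp hq with ⟨e, _, rfl⟩
      exact (hpk.1 p hp).2
  rw [foldFilter _ _ hps hppw, hemp, List.nil_append]
  -- B's side: descending range → reverse of the ascending range → foldr over ones
  have hrange : PySem.List.pyRange (n - 1) (fi - 1) (-1) = (PySem.List.pyRange fi n 1).reverse := by
    have := PySem.List.pyRange_neg_one_eq_reverse (n - 1) (fi - 1)
    simpa using this
  rw [PySem.List.foldl_if_eq_foldl_filter
    (fun i => PySem.List.pyGetD occupied i 0 == 1)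
    (fun (acc : Option Int × List (Int × Int)) i =>
      (some i,
       match acc.1 with
       | some e => if e - (i + 1) > 0 then acc.2 ++ [(i + 1, e - (i + 1))] else acc.2
       | none => acc.2)), hrange, List.filter_reverse, ← hones, List.foldl_reverse]
  set E : Option Int := if PySem.List.pyGetD occupied (n - 1) 0 == 0 then some n else none with hEd
  have hE : ∀ v, E = some v → L ≤ v := by
    intro v hv
    rw [hEd] at hv
    split at hv
    · cases hv; exact hLn
    · cases hv
  have hB := foldB ones fi E (fun j hj => (honesmem j hj).1) honespw hE
  have hTE : pvTail L E = T.map (fun e => (L, e - L)) := by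
    rw [hEd, hT]; split <;> simp [pvTail]
  rw [← hTE]
  exact hB.symm
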